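-- pv_equiv track=rewrite | github.com/bashitatsu/thesis_program | to_csv.py | count_scs
-- ===== SOURCE A (Python) =====
-- def count_scs(l):
--     d = {}
--     scs = 5
--     for sub in l:
--         for i in range(len(sub) - scs + 1):
--             if sub[i:i+scs] not in d.keys():
--                 d[sub[i:i+scs]] = 1
--             else:
--                 d[sub[i:i+scs]] += 1
--
--     return d
-- ===== SOURCE B (Python) =====
-- def count_scs(l):
--     # sort all length-5 windows, count runs in the sorted list, then
--     # emit counts in first-occurrence order of the windows
--     windows = [s[i:i + 5] for s in l for i in range(len(s) - 4)]
--     counts = {}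
--     run_key = None
--     run_len = 0
--     for w in sorted(windows):
--         if w == run_key:
--             run_len += 1
--         else:
--             if run_len:
--                 counts[run_key] = run_len
--             run_key = w
--             run_len = 1
--     if run_len:
--         counts[run_key] = run_len
--     return {w: counts[w] for w in dict.fromkeys(windows)}
-- ===== Notes on version B (the rewrite author's own statement) =====
-- stated objective: alternative
-- what changed: B gathers all length-5 windows into one flat list, sorts it, counts runs of equal windows in a single scan of the sorted list, and finally re-emits the counts keyed in first-occurrence order, instead of A's nested loops that test membership and update a running dict per window.
import Mathlib
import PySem

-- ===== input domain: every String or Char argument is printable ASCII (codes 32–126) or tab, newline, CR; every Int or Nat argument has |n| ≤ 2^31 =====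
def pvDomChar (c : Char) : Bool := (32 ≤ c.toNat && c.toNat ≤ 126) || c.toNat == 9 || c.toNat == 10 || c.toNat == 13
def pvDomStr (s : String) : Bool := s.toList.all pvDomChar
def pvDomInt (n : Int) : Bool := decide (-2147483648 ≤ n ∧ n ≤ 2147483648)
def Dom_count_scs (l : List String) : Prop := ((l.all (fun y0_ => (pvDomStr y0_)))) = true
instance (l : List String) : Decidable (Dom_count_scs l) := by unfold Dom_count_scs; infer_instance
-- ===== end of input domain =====

-- B sorts the flat list of length-5 windows, counts runs in the sorted list,
-- and re-emits the counts in first-occurrence order; A updates a running dict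
-- inside nested loops. Alternative algorithm, equal results.

-- ===== PORT A =====
def count_scs (l : List String) : List (String × Int) :=
  (l.foldl (fun d sub =>
      (PySem.List.pyRange 0 (PySem.Str.len sub - 5 + 1) 1).foldl (fun d i =>
        if d.contains (PySem.Str.slice sub (some i) (some (i + 5))) = false then
          d.insert (PySem.Str.slice sub (some i) (some (i + 5))) 1
        else
          d.insert (PySem.Str.slice sub (some i) (some (i + 5)))
            (d.getD (PySem.Str.slice sub (some i) (some (i + 5))) 0 + 1)) d)
    PySem.Dict.empty).items

-- ===== PORT B =====
-- loop body of B's 'for w in sorted(windows)': state (counts, run_key, run_len)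
def pvStep (st : PySem.Dict String Int × Option String × Int) (w : String) :
    PySem.Dict String Int × Option String × Int :=
  match st with
  | (counts, runKey, runLen) =>
    if runKey = some w then (counts, runKey, runLen + 1)
    else ((if runLen ≠ 0 then counts.insert (runKey.getD "") runLen else counts), some w, 1)

-- the trailing 'if run_len: counts[run_key] = run_len' after the loop
-- (run_key is a real string whenever run_len ≠ 0, so the getD "" default is unreachable)
def pvFinish (st : PySem.Dict String Int × Option String × Int) : PySem.Dict String Int :=
  match st with
  | (counts, runKey, runLen) => if runLen ≠ 0 then counts.insert (runKey.getD "") runLen else counts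

def count_scs_alt (l : List String) : List (String × Int) :=
  let windows := l.flatMap (fun s =>
    (PySem.List.pyRange 0 (PySem.Str.len s - 4) 1).map
      (fun i => PySem.Str.slice s (some i) (some (i + 5))))
  let counts := pvFinish ((PySem.List.sorted windows (fun x => x) false).foldl pvStep
    (PySem.Dict.empty, none, 0))
  ((PySem.List.dedup windows).foldl
    (fun d w => d.insert w (counts.getD w 0)) PySem.Dict.empty).items

-- ===== PRECONDITION & SPEC =====
def Spec_count_scs (l : List String) (out : List (String × Int)) : Prop := out = count_scs_alt l
instance (l : List String) (out : List (String × Int)) : Decidable (Spec_count_scs l out) := by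
  unfold Spec_count_scs; infer_instance

-- ===== CLAIM =====
def Claim_equal_count_scs : Prop := ∀ (l : List String), Dom_count_scs l → Spec_count_scs l (count_scs l)

-- ===== LEMMAS AND PROOFS =====

theorem pv_branch_eq (d : PySem.Dict String Int) (w : String) :
    (if d.contains w = false then d.insert w 1 else d.insert w (d.getD w 0 + 1))
      = d.insert w (d.getD w 0 + 1) := by
  by_cases h : d.contains w = false
  · rw [if_pos h, PySem.Dict.getD_of_not_contains d 0 h]; norm_num
  · rw [if_neg h]

theorem pv_foldl_flatMap {α β σ : Type} (g : α → List β) (f : σ → β → σ)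
    (l : List α) (init : σ) :
    (l.flatMap g).foldl f init = l.foldl (fun a x => (g x).foldl f a) init := by
  induction l generalizing init with
  | nil => rfl
  | cons x xs ih => simp [List.flatMap_cons, List.foldl_append, ih]

theorem pv_inner (s : String) (d : PySem.Dict String Int) :
    (PySem.List.pyRange 0 (PySem.Str.len s - 5 + 1) 1).foldl (fun d i =>
        if d.contains (PySem.Str.slice s (some i) (some (i + 5))) = false then
          d.insert (PySem.Str.slice s (some i) (some (i + 5))) 1
        else
          d.insert (PySem.Str.slice s (some i) (some (i + 5)))
            (d.getD (PySem.Str.slice s (some i) (some (i + 5))) 0 + 1)) d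
    = ((PySem.List.pyRange 0 (PySem.Str.len s - 4) 1).map
        (fun i => PySem.Str.slice s (some i) (some (i + 5)))).foldl
        (fun d w => d.insert w (d.getD w 0 + 1)) d := by
  rw [List.foldl_map, show PySem.Str.len s - 5 + 1 = PySem.Str.len s - 4 from by ring]
  simp only [pv_branch_eq]

-- invariant of B's run-length loop over the (sorted, hence grouped) tail
theorem pv_loop (ss : List String) (counts : PySem.Dict String Int) (k : String) (n : Int)
    (hn : 0 < n) (hs : ss.Pairwise (· ≤ ·)) (hk : ∀ x ∈ ss, k ≤ x) (w : String) :
    (pvFinish (ss.foldl pvStep (counts, some k, n))).getD w 0 =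
      if w = k then n + (ss.count k : Int)
      else if w ∈ ss then (ss.count w : Int)
      else counts.getD w 0 := by
  induction ss generalizing counts k n with
  | nil =>
    simp only [List.foldl_nil, pvFinish, ne_eq, hn.ne', not_false_eq_true, if_true,
      Option.getD_some, PySem.Dict.getD_insert, List.count_nil, List.not_mem_nil,
      if_false, Nat.cast_zero, add_zero]
  | cons h t ih =>
    rw [List.pairwise_cons] at hs
    by_cases hhk : h = k
    · subst hhk
      rw [List.foldl_cons, show pvStep (counts, some h, n) h = (counts, some h, n + 1) from by
        simp [pvStep]]
      rw [ih counts h (n + 1) (by omega) hs.2 hs.1]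
      by_cases hw : w = h
      · subst hw
        rw [if_pos rfl, if_pos rfl, List.count_cons_self]
        push_cast; ring
      · have hw' : h ≠ w := fun he => hw he.symm
        simp only [List.mem_cons, hw, false_or, List.count_cons_of_ne hw', if_false]
    · have hkh : k ≤ h := hk h List.mem_cons_self
      have hkh' : ¬ k = h := fun he => hhk he.symm
      have hknt : k ∉ t := fun hm => hhk (le_antisymm (hs.1 k hm) hkh)
      rw [List.foldl_cons, show pvStep (counts, some k, n) h =
          (counts.insert k n, some h, 1) from by simp [pvStep, hkh', hn.ne']]
      rw [ih (counts.insert k n) h 1 one_pos hs.2 hs.1]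
      by_cases hw : w = h
      · subst hw
        rw [if_pos rfl, if_neg hhk, if_pos List.mem_cons_self, List.count_cons_self]
        push_cast; ring
      · by_cases hwk : w = k
        · subst hwk
          rw [if_neg hw, if_neg (fun hm : w ∈ t => hknt hm), PySem.Dict.getD_insert_self,
            if_pos rfl, List.count_cons_of_ne (fun he : h = w => hhk he),
            List.count_eq_zero_of_not_mem hknt]
          simp
        · rw [if_neg hw, if_neg hwk]
          by_cases hwt : w ∈ t
          · rw [if_pos hwt, if_pos (List.mem_cons_of_mem _ hwt),
              List.count_cons_of_ne (fun he : h = w => hw he.symm)]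
          · rw [if_neg hwt, if_neg (by simp [hw, hwt]),
              PySem.Dict.getD_insert_of_ne counts n 0 hwk]

-- the run-length scan of sorted(ws) computes the multiplicities of ws
theorem pv_scan_count (ws : List String) (w : String) (hw : w ∈ ws) :
    (pvFinish ((PySem.List.sorted ws (fun x => x) false).foldl pvStep
        (PySem.Dict.empty, none, 0))).getD w 0 = (ws.count w : Int) := by
  have hperm := PySem.List.sorted_perm ws (fun x => x) false
  have hpair := PySem.List.sorted_pairwise ws (fun x => x)
  have hmem : w ∈ PySem.List.sorted ws (fun x => x) false := hperm.mem_iff.mpr hw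
  rw [show (ws.count w : Int) =
    ((PySem.List.sorted ws (fun x => x) false).count w : Int) from by rw [hperm.count_eq]]
  cases hss : PySem.List.sorted ws (fun x => x) false with
  | nil => rw [hss] at hmem; exact absurd hmem (List.not_mem_nil)
  | cons h t =>
    rw [hss] at hmem hpair
    rw [List.pairwise_cons] at hpair
    rw [List.foldl_cons, show pvStep (PySem.Dict.empty, none, 0) h =
        (PySem.Dict.empty, some h, 1) from by simp [pvStep]]
    rw [pv_loop t PySem.Dict.empty h 1 one_pos hpair.2 hpair.1 w]
    by_cases hwh : w = h
    · subst hwh; rw [if_pos rfl, List.count_cons_self]; push_cast; ring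
    · rw [if_neg hwh, List.count_cons_of_ne (fun he : h = w => hwh he.symm),
        if_pos ((List.mem_cons.mp hmem).resolve_left hwh)]

-- items of B's final first-occurrence-ordered rebuild (fresh distinct keys append)
theorem pv_items (ws : List String) (f : String → Int) :
    ((PySem.List.dedup ws).foldl (fun d w => d.insert w (f w)) PySem.Dict.empty).items
      = (PySem.List.dedup ws).map (fun w => (w, f w)) := by
  simpa using PySem.Dict.items_foldl_insert_fresh (PySem.List.dedup ws) (fun w => w) f
    PySem.Dict.empty (by simp) (by simp)

-- ===== VERDICT =====
theorem count_scs_spec : Claim_equal_count_scs := by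
  intro l _
  show count_scs l = count_scs_alt l
  unfold count_scs count_scs_alt
  simp only [pv_inner]
  rw [← pv_foldl_flatMap, PySem.Dict.foldl_insert_getD_add_one_eq_counter,
    PySem.Dict.items_counter]
  set ws := l.flatMap (fun s =>
    (PySem.List.pyRange 0 (PySem.Str.len s - 4) 1).map
      (fun i => PySem.Str.slice s (some i) (some (i + 5)))) with hws
  rw [pv_items, PySem.List.dedup_eq_ofList]
  exact (List.map_congr_left (fun w hw =>
    by rw [pv_scan_count ws w ((PySem.Set.mem_ofList _ _).mp hw)])).symm
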